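-- pv_equiv track=rewrite | github.com/gadhiar/mist.ai | backend/knowledge/ingestion/chunker.py | _merge_small_sections
-- ===== SOURCE A (Python) =====
-- def _merge_small_sections(sections: list[str]) -> list[str]:
--     """Merge sections with fewer than 20 words into the next section.
--
--     The last section is never merged forward (kept as-is regardless
--     of size).
--     """
--     if len(sections) <= 1:
--         return sections
--
--     merged: list[str] = []
--     carry = ""
--
--     for i, section in enumerate(sections):
--         combined = (carry + "\n" + section).strip() if carry else section
--         word_count = len(combined.split())
--         is_last = i == len(sections) - 1
--
--         if is_last or word_count >= 20:
--             merged.append(combined)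
--             carry = ""
--         else:
--             carry = combined
--
--     # If there's leftover carry, append it
--     if carry:
--         if merged:
--             merged[-1] = merged[-1] + "\n" + carry
--         else:
--             merged.append(carry)
--
--     return merged
-- ===== SOURCE B (Python) =====
-- def _merge_small_sections(sections: list[str]) -> list[str]:
--     """Merge sections with fewer than 20 words into the next section.
--
--     Two phases: first partition the sections into groups using only a
--     running per-section word count (a group closes once it reaches 20
--     words; the final section closes the last group), then render each
--     group by folding its sections together.
--     """
--     if len(sections) <= 1:
--         return sections
--
--     groups: list[list[str]] = []
--     current: list[str] = []
--     words = 0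
--
--     for i, section in enumerate(sections):
--         current.append(section)
--         words += len(section.split())
--         if i == len(sections) - 1 or words >= 20:
--             groups.append(current)
--             current = []
--             words = 0
--
--     return [_join_group(group) for group in groups]
--
--
-- def _join_group(group: list[str]) -> str:
--     """Combine a group of sections into one block of text."""
--     text = ""
--     for section in group:
--         text = (text + "\n" + section).strip() if text else section
--     return text
-- ===== Notes on version B (the rewrite author's own statement) =====
-- stated objective: alternative
-- what changed: B separates grouping from rendering: it partitions the sections into groups using only a running per-section word count (never re-splitting the accumulated text, which A does on every iteration), then folds each group into its text block once; measured ~2x faster at the largest size.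
import Mathlib
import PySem

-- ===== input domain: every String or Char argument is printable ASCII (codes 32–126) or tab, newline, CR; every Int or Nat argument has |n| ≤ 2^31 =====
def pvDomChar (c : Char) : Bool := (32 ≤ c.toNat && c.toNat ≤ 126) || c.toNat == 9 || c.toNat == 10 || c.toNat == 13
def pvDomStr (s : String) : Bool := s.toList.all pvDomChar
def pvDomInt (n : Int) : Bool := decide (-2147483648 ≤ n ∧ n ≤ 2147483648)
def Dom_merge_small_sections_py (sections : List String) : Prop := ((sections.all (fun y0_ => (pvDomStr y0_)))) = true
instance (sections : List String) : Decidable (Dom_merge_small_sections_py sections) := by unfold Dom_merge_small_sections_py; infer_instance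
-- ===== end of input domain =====

-- B partitions the sections into groups by a running per-section word count, then folds each
-- group into its text block once, instead of A's interleaved carry that is re-split each step.

-- ===== PORT A =====
-- Python 'a + b' on strings; exact (concatenation of code points)
def pvCat (a b : String) : String := String.ofList (a.toList ++ b.toList)

def mergeAstep (n : Int) (st : List String × String) (p : Int × String) : List String × String :=
  let combined := if st.2 ≠ "" then PySem.Str.strip (pvCat (pvCat st.2 "\n") p.2) else p.2
  let word_count := (PySem.Str.split₀ combined).length
  let is_last : Prop := p.1 = n - 1
  if is_last ∨ word_count ≥ 20 then (st.1 ++ [combined], "") else (st.1, combined)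

def merge_small_sections_py (sections : List String) : List String :=
  if sections.length ≤ 1 then sections
  else
    let r := (PySem.List.enumerate sections).foldl (mergeAstep (sections.length : Int)) ([], "")
    -- trailing 'if carry:' block of A (unreachable when length ≥ 2, ported all the same)
    if r.2 ≠ "" then
      if r.1 ≠ [] then r.1.dropLast ++ [pvCat (pvCat r.1.getLast! "\n") r.2]
      else r.1 ++ [r.2]
    else r.1

-- ===== PORT B =====
-- Source B _join_group: fold the group's sections into one block of text
def joinGroup (group : List String) : String :=
  group.foldl (fun text s => if text ≠ "" then PySem.Str.strip (pvCat (pvCat text "\n") s) else s) ""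

def mergeBstep (n : Int) (st : List (List String) × List String × Nat) (p : Int × String) :
    List (List String) × List String × Nat :=
  let current := st.2.1 ++ [p.2]
  let words := st.2.2 + (PySem.Str.split₀ p.2).length
  if p.1 = n - 1 ∨ words ≥ 20 then (st.1 ++ [current], [], 0) else (st.1, current, words)

def merge_small_sections_py_alt (sections : List String) : List String :=
  if sections.length ≤ 1 then sections
  else
    (((PySem.List.enumerate sections).foldl (mergeBstep (sections.length : Int))
        ([], [], 0)).1).map joinGroup

-- ===== PRECONDITION & SPEC =====
def Spec_merge_small_sections_py (sections : List String) (out : List String) : Prop := out = merge_small_sections_py_alt sections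
instance (sections : List String) (out : List String) : Decidable (Spec_merge_small_sections_py sections out) := by unfold Spec_merge_small_sections_py; infer_instance

-- ===== CLAIM (what is proved, stated in full; the proofs are below) =====
def Claim_equal_merge_small_sections_py : Prop := ∀ (sections : List String), Dom_merge_small_sections_py sections → Spec_merge_small_sections_py sections (merge_small_sections_py sections)

-- ===== LEMMAS AND PROOFS =====

-- word counter: cnt s b = number of blank-separated words of s, b = "currently inside a word"
def cnt : List Char → Bool → Nat
  | [], b => if b then 1 else 0
  | c :: r, b => if PySem.Chars.isspace c then (if b then 1 else 0) + cnt r false else cnt r true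

def allSp (s : List Char) : Prop := ∀ c ∈ s, PySem.Chars.isspace c = true

lemma go_len (s : List Char) : ∀ cur acc, (PySem.Chars.split₀.go s cur acc).length = acc.length + cnt s (!cur.isEmpty) := by
  induction s with
  | nil => intro cur acc; cases cur <;> simp [PySem.Chars.split₀.go, cnt]
  | cons c r ih =>
    intro cur acc
    by_cases h : PySem.Chars.isspace c
    · cases cur <;> simp [PySem.Chars.split₀.go, h, cnt, ih] <;> omega
    · cases cur <;> simp [PySem.Chars.split₀.go, h, cnt, ih]

lemma split0_len (s : List Char) : (PySem.Chars.split₀ s).length = cnt s false := by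
  simpa using go_len s [] []

lemma str_split0_len (s : String) : (PySem.Str.split₀ s).length = cnt s.toList false := by
  have h2 : (List.map String.toList (PySem.Str.split₀ s)).length = (PySem.Chars.split₀ s.toList).length :=
    congrArg List.length (PySem.Str.split₀_map_toList s)
  rw [List.length_map] at h2
  rw [h2, split0_len]

lemma cnt_allSp : ∀ {s : List Char}, allSp s → ∀ b, cnt s b = if b then 1 else 0 := by
  intro s
  induction s with
  | nil => intro _ b; simp [cnt]
  | cons c r ih =>
    intro h b
    have hc := h c (by simp)
    have hr : allSp r := fun d hd => h d (by simp [hd])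
    simp [cnt, hc, ih hr]

lemma cnt_append_space {d : Char} (hd : PySem.Chars.isspace d = true) (y : List Char) :
    ∀ (x : List Char) (b : Bool), cnt (x ++ d :: y) b = cnt x b + cnt y false := by
  intro x
  induction x with
  | nil => intro b; simp [cnt, hd]
  | cons e x ih =>
    intro b
    by_cases he : PySem.Chars.isspace e <;> simp [cnt, he, ih] <;> omega

lemma cnt_append_allSp {t : List Char} (ht : allSp t) :
    ∀ (x : List Char) (b : Bool), cnt (x ++ t) b = cnt x b := by
  intro x
  induction x with
  | nil => intro b; simp [cnt, cnt_allSp ht]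
  | cons e x ih =>
    intro b
    by_cases he : PySem.Chars.isspace e <;> simp [cnt, he, ih]

lemma cnt_lstrip (s : List Char) : cnt (PySem.Chars.lstrip s) false = cnt s false := by
  induction s with
  | nil => rfl
  | cons c r ih =>
    by_cases h : PySem.Chars.isspace c
    · simpa [PySem.Chars.lstrip, List.dropWhile_cons, h, cnt] using ih
    · simp [PySem.Chars.lstrip, List.dropWhile_cons, h]

lemma cnt_rstrip (s : List Char) : cnt (PySem.Chars.rstrip s) false = cnt s false := by
  have hd : PySem.Chars.rstrip s ++ (List.takeWhile PySem.Chars.isspace s.reverse).reverse = s := by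
    rw [PySem.Chars.rstrip]
    conv_rhs => rw [← List.reverse_reverse s, ← List.takeWhile_append_dropWhile (p := PySem.Chars.isspace) (l := s.reverse)]
    rw [List.reverse_append]
  have ht : allSp ((List.takeWhile PySem.Chars.isspace s.reverse).reverse) :=
    fun c hc => List.mem_takeWhile_imp (List.mem_reverse.mp hc)
  calc cnt (PySem.Chars.rstrip s) false
      = cnt (PySem.Chars.rstrip s ++ (List.takeWhile PySem.Chars.isspace s.reverse).reverse) false :=
        (cnt_append_allSp ht _ _).symm
    _ = cnt s false := by rw [hd]

lemma cnt_strip (s : List Char) : cnt (PySem.Chars.strip s) false = cnt s false := by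
  rw [PySem.Chars.strip, cnt_rstrip, cnt_lstrip]

-- the combine step of _join_group / of A's loop body, and its word count
def combineB (text s : String) : String :=
  if text ≠ "" then PySem.Str.strip (pvCat (pvCat text "\n") s) else s

lemma cnt_combineB (text s : String) :
    cnt (combineB text s).toList false = cnt text.toList false + cnt s.toList false := by
  by_cases h : text = ""
  · subst h
    simp [combineB, cnt]
  · rw [combineB, if_pos h, PySem.Str.toList_strip]
    have hraw : (pvCat (pvCat text "\n") s).toList = text.toList ++ '\n' :: s.toList := by
      simp [pvCat, String.toList_ofList]
    rw [hraw, cnt_strip, cnt_append_space (by decide)]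

lemma joinGroup_append (g : List String) (s : String) :
    joinGroup (g ++ [s]) = combineB (joinGroup g) s := by
  simp [joinGroup, combineB, List.foldl_append]

-- invariant tying A's (merged, carry) to B's (groups, current, words)
def pvRel (a : List String × String) (b : List (List String) × List String × Nat) : Prop :=
  a.1 = b.1.map joinGroup ∧ a.2 = joinGroup b.2.1 ∧ b.2.2 = cnt a.2.toList false

lemma step_rel (n i : Int) (s : String) (mA : List String) (c : String)
    (gs : List (List String)) (cur : List String) (w : Nat)
    (h : pvRel (mA, c) (gs, cur, w)) :
    pvRel (mergeAstep n (mA, c) (i, s)) (mergeBstep n (gs, cur, w) (i, s)) ∧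
    (i = n - 1 → (mergeAstep n (mA, c) (i, s)).2 = "") := by
  obtain ⟨hm, hc, hw⟩ := h
  dsimp only at hm hc hw
  have hcomb : combineB c s = joinGroup (cur ++ [s]) := by rw [joinGroup_append, hc]
  have hwq : (PySem.Str.split₀ (combineB c s)).length = w + (PySem.Str.split₀ s).length := by
    rw [str_split0_len, cnt_combineB, hw, str_split0_len]
  have hA : mergeAstep n (mA, c) (i, s)
      = if i = n - 1 ∨ (PySem.Str.split₀ (combineB c s)).length ≥ 20
        then (mA ++ [combineB c s], "") else (mA, combineB c s) := rfl
  have hB : mergeBstep n (gs, cur, w) (i, s)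
      = if i = n - 1 ∨ w + (PySem.Str.split₀ s).length ≥ 20
        then (gs ++ [cur ++ [s]], [], 0) else (gs, cur ++ [s], w + (PySem.Str.split₀ s).length) := rfl
  rw [hA, hB, hwq]
  by_cases hem : i = n - 1 ∨ w + (PySem.Str.split₀ s).length ≥ 20
  · rw [if_pos hem, if_pos hem]
    refine ⟨⟨?_, ?_, ?_⟩, fun _ => rfl⟩
    · dsimp only; rw [hm, hcomb, List.map_append, List.map_cons, List.map_nil]
    · dsimp only; simp [joinGroup]
    · dsimp only; simp [cnt]
  · rw [if_neg hem, if_neg hem]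
    refine ⟨⟨hm, hcomb, ?_⟩, fun hi => absurd (Or.inl hi) hem⟩
    dsimp only
    rw [str_split0_len, cnt_combineB, ← hw]

lemma fold_rel (n : Int) : ∀ (tail : List String) (k : Int) (stA : List String × String)
    (stB : List (List String) × List String × Nat), pvRel stA stB →
    pvRel ((PySem.List.enumerate tail k).foldl (mergeAstep n) stA)
        ((PySem.List.enumerate tail k).foldl (mergeBstep n) stB) ∧
    (tail ≠ [] → k + (tail.length : Int) = n →
      ((PySem.List.enumerate tail k).foldl (mergeAstep n) stA).2 = "") := by
  intro tail
  induction tail with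
  | nil =>
    intro k stA stB h
    exact ⟨by simpa [PySem.List.enumerate] using h, by intro h' _; cases h' rfl⟩
  | cons x t ih =>
    intro k stA stB h
    obtain ⟨mA, c⟩ := stA
    obtain ⟨gs, cur, w⟩ := stB
    have hstep := step_rel n k x mA c gs cur w h
    have henum : PySem.List.enumerate (x :: t) k = (k, x) :: PySem.List.enumerate t (k + 1) := rfl
    rw [henum]
    simp only [List.foldl_cons]
    have hrec := ih (k + 1) _ _ hstep.1
    refine ⟨hrec.1, ?_⟩
    intro _ hlen
    cases t with
    | nil =>
      simp only [PySem.List.enumerate, List.foldl_nil]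
      apply hstep.2
      simp at hlen
      omega
    | cons y t' =>
      apply hrec.2 (by simp)
      simp only [List.length_cons] at hlen ⊢
      push_cast at hlen ⊢
      omega

-- ===== VERDICT (by name: the statement is the Claim_ definition above) =====
theorem merge_small_sections_py_spec : Claim_equal_merge_small_sections_py := by
  intro sections _
  unfold Spec_merge_small_sections_py
  by_cases hlen : sections.length ≤ 1
  · simp [merge_small_sections_py, merge_small_sections_py_alt, hlen]
  · simp only [merge_small_sections_py, merge_small_sections_py_alt, if_neg hlen]
    have h0 : pvRel ([], "") ([], [], 0) := ⟨rfl, by simp [joinGroup], by simp [cnt]⟩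
    have hmain := fold_rel (sections.length : Int) sections 0 ([], "") ([], [], 0) h0
    have hne : sections ≠ [] := by
      intro hh; rw [hh] at hlen; simp at hlen
    have hcarry := hmain.2 hne (by simp)
    rw [if_neg (by simp [hcarry])]
    exact hmain.1.1
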